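-- pv_equiv track=rewrite | github.com/Bekal17/BACKEND-BLOCK-ID | backend_blockid/tools/auto_detect_scam_tx_devnet.py | _interacts_with_scam_wallet
-- ===== SOURCE A (Python) =====
-- from typing import Any
--
-- def _interacts_with_scam_wallet(tx: dict[str, Any], scam_wallets: set[str]) -> bool:
--     for t in tx.get("nativeTransfers") or []:
--         if t.get("fromUserAccount") in scam_wallets or t.get("toUserAccount") in scam_wallets:
--             return True
--     for t in tx.get("tokenTransfers") or []:
--         if t.get("fromUserAccount") in scam_wallets or t.get("toUserAccount") in scam_wallets:
--             return True
--     return False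
-- ===== SOURCE B (Python) =====
-- def _interacts_with_scam_wallet(tx, scam_wallets):
--     # Inverted traversal: first collect every account the tx touches into one
--     # set, then scan the scam wallets and test each against that set.
--     touched = set()
--     for key in ("nativeTransfers", "tokenTransfers"):
--         for t in tx.get(key) or []:
--             touched.add(t.get("fromUserAccount"))
--             touched.add(t.get("toUserAccount"))
--     for w in scam_wallets:
--         if w in touched:
--             return True
--     return False
-- ===== Notes on version B (the rewrite author's own statement) =====
-- stated objective: alternative
-- what changed: B inverts the traversal direction: it first accumulates every from/to account of both transfer lists into a set of touched accounts, then its decision loop iterates over the scam wallets testing each against that set, whereas A iterates over the transfers testing each transfer's accounts against the scam set with per-transfer early return.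
import Mathlib
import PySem

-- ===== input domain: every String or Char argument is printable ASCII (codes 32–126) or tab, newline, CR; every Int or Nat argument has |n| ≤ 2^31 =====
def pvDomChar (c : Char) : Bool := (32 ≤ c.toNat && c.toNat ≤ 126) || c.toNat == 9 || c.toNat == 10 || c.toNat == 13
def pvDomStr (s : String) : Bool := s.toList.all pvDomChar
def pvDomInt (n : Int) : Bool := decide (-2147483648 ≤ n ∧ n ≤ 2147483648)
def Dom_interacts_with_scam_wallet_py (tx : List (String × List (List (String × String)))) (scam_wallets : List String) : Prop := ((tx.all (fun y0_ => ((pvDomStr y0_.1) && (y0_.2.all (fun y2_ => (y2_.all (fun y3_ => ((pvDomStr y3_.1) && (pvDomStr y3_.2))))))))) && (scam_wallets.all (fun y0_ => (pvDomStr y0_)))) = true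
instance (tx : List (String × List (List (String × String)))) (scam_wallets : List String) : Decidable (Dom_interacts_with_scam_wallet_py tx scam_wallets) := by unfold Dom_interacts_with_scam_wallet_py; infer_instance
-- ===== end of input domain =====

-- ===== PORT A =====

-- B inverts the traversal: it accumulates every touched account into a set, then its decision loop scans the scam wallets against that set (alternative decomposition, same cost).

-- ===== PORT A =====
-- 't.get("fromUserAccount") in scam_wallets or t.get("toUserAccount") in scam_wallets'
def pvHitA (t : List (String × String)) (scam_wallets : List String) : Bool :=
  (match (PySem.Dict.mk t).get? "fromUserAccount" with
   | some s => PySem.Set.contains scam_wallets s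
   | none => false)
  || (match (PySem.Dict.mk t).get? "toUserAccount" with
      | some s => PySem.Set.contains scam_wallets s
      | none => false)

-- 'for t in …: if <hit>: return True'
def pvScanA (ts : List (List (String × String))) (scam_wallets : List String) : Bool :=
  match ts with
  | [] => false
  | t :: rest => if pvHitA t scam_wallets then true else pvScanA rest scam_wallets

def interacts_with_scam_wallet_py (tx : List (String × List (List (String × String)))) (scam_wallets : List String) : Bool :=
  if pvScanA (((PySem.Dict.mk tx).get? "nativeTransfers").getD []) scam_wallets then true
  else if pvScanA (((PySem.Dict.mk tx).get? "tokenTransfers").getD []) scam_wallets then true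
  else false

-- ===== PORT B =====
-- 'for key in (…): for t in tx.get(key) or []: touched.add(from); touched.add(to)'
def pvTouched (tx : List (String × List (List (String × String)))) : PySem.Set (Option String) :=
  (["nativeTransfers", "tokenTransfers"]).foldl
    (fun acc key =>
      (((PySem.Dict.mk tx).get? key).getD []).foldl
        (fun acc2 t =>
          PySem.Set.add
            (PySem.Set.add acc2 ((PySem.Dict.mk t).get? "fromUserAccount"))
            ((PySem.Dict.mk t).get? "toUserAccount"))
        acc)
    PySem.Set.empty

-- 'for w in scam_wallets: if w in touched: return True / return False'
def pvScanB (ws : List String) (touched : PySem.Set (Option String)) : Bool :=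
  match ws with
  | [] => false
  | w :: rest => if PySem.Set.contains touched (some w) then true else pvScanB rest touched

def interacts_with_scam_wallet_py_alt (tx : List (String × List (List (String × String)))) (scam_wallets : List String) : Bool :=
  pvScanB scam_wallets (pvTouched tx)

-- ===== PRECONDITION & SPEC =====
def Spec_interacts_with_scam_wallet_py (tx : List (String × List (List (String × String)))) (scam_wallets : List String) (out : Bool) : Prop := out = interacts_with_scam_wallet_py_alt tx scam_wallets
instance (tx : List (String × List (List (String × String)))) (scam_wallets : List String) (out : Bool) : Decidable (Spec_interacts_with_scam_wallet_py tx scam_wallets out) := by unfold Spec_interacts_with_scam_wallet_py; infer_instance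

-- ===== CLAIM =====
def Claim_equal_interacts_with_scam_wallet_py : Prop := ∀ (tx : List (String × List (List (String × String)))) (scam_wallets : List String), Dom_interacts_with_scam_wallet_py tx scam_wallets → Spec_interacts_with_scam_wallet_py tx scam_wallets (interacts_with_scam_wallet_py tx scam_wallets)

-- ===== LEMMAS AND PROOFS =====
theorem pvScanA_eq_any (ts : List (List (String × String))) (scam : List String) :
    pvScanA ts scam = ts.any (fun t => pvHitA t scam) := by
  induction ts with
  | nil => rfl
  | cons t rest ih =>
    simp only [pvScanA, List.any_cons, ih]
    by_cases h : pvHitA t scam = true <;> simp [h]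

theorem pvScanB_eq_any (ws : List String) (touched : PySem.Set (Option String)) :
    pvScanB ws touched = ws.any (fun w => PySem.Set.contains touched (some w)) := by
  induction ws with
  | nil => rfl
  | cons w rest ih =>
    simp only [pvScanB, List.any_cons, ih]
    by_cases h : PySem.Set.contains touched (some w) = true <;> simp


theorem mem_inner_fold (ts : List (List (String × String))) (acc : PySem.Set (Option String))
    (a : Option String) :
    a ∈ ts.foldl (fun acc2 t =>
        PySem.Set.add (PySem.Set.add acc2 ((PySem.Dict.mk t).get? "fromUserAccount"))
          ((PySem.Dict.mk t).get? "toUserAccount")) acc ↔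
      a ∈ acc ∨ ∃ t ∈ ts, a = (PySem.Dict.mk t).get? "fromUserAccount" ∨
                          a = (PySem.Dict.mk t).get? "toUserAccount" := by
  induction ts generalizing acc with
  | nil => simp
  | cons t rest ih =>
    simp only [List.foldl_cons, ih, PySem.Set.mem_add, List.mem_cons]
    constructor
    · rintro (((h | h) | h) | ⟨t', ht', h⟩)
      · exact Or.inl h
      · exact Or.inr ⟨t, Or.inl rfl, Or.inl h⟩
      · exact Or.inr ⟨t, Or.inl rfl, Or.inr h⟩
      · exact Or.inr ⟨t', Or.inr ht', h⟩
    · rintro (h | ⟨t', (rfl | ht'), h⟩)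
      · exact Or.inl (Or.inl (Or.inl h))
      · rcases h with h | h
        · exact Or.inl (Or.inl (Or.inr h))
        · exact Or.inl (Or.inr h)
      · exact Or.inr ⟨t', ht', h⟩

theorem mem_touched (tx : List (String × List (List (String × String)))) (a : Option String) :
    a ∈ pvTouched tx ↔
      ∃ tl ∈ [((PySem.Dict.mk tx).get? "nativeTransfers").getD [],
              ((PySem.Dict.mk tx).get? "tokenTransfers").getD []],
        ∃ t ∈ tl, a = (PySem.Dict.mk t).get? "fromUserAccount" ∨
                  a = (PySem.Dict.mk t).get? "toUserAccount" := by
  unfold pvTouched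
  simp only [List.foldl_cons, List.foldl_nil, mem_inner_fold, List.mem_cons,
    List.not_mem_nil, or_false, PySem.Set.empty]
  constructor
  · rintro ((h | ⟨t, ht, h⟩) | ⟨t, ht, h⟩)
    · exact h.elim
    · exact ⟨_, Or.inl rfl, t, ht, h⟩
    · exact ⟨_, Or.inr rfl, t, ht, h⟩
  · rintro ⟨tl, (rfl | rfl), t, ht, h⟩
    · exact Or.inl (Or.inr ⟨t, ht, h⟩)
    · exact Or.inr ⟨t, ht, h⟩

theorem optmem (scam : List String) (o : Option String) :
    (match o with | some s => PySem.Set.contains scam s | none => false) = true ↔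
      (∃ w ∈ scam, o = some w) := by
  cases o <;> simp

theorem hitA_iff (t : List (String × String)) (scam : List String) :
    pvHitA t scam = true ↔
      ((∃ w ∈ scam, (PySem.Dict.mk t).get? "fromUserAccount" = some w) ∨
       (∃ w ∈ scam, (PySem.Dict.mk t).get? "toUserAccount" = some w)) := by
  unfold pvHitA
  rw [Bool.or_eq_true, optmem, optmem]

theorem interacts_with_scam_wallet_py_spec : Claim_equal_interacts_with_scam_wallet_py := by
  unfold Claim_equal_interacts_with_scam_wallet_py
  intro tx scam _
  unfold Spec_interacts_with_scam_wallet_py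
  unfold interacts_with_scam_wallet_py interacts_with_scam_wallet_py_alt
  rw [pvScanA_eq_any, pvScanA_eq_any, pvScanB_eq_any]
  rcases hB : scam.any (fun w => PySem.Set.contains (pvTouched tx) (some w)) with _ | _
  · -- B false: no scam wallet touched; both A scans come out false
    rw [List.any_eq_false] at hB
    have noHit : ∀ tl ∈ [((PySem.Dict.mk tx).get? "nativeTransfers").getD [],
        ((PySem.Dict.mk tx).get? "tokenTransfers").getD []],
        tl.any (fun t => pvHitA t scam) = false := by
      intro tl htl
      rw [List.any_eq_false]
      intro t htt hhit
      rw [hitA_iff] at hhit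
      have key : ∀ a, (∃ w ∈ scam, a = some w) →
          (a = (PySem.Dict.mk t).get? "fromUserAccount" ∨
           a = (PySem.Dict.mk t).get? "toUserAccount") → False := by
        rintro a ⟨w, hw, rfl⟩ h
        apply hB w hw
        rw [PySem.Set.contains_iff, mem_touched]
        exact ⟨tl, htl, t, htt, h⟩
      rcases hhit with ⟨w, hw, h⟩ | ⟨w, hw, h⟩
      · exact key _ ⟨w, hw, h⟩ (Or.inl rfl)
      · exact key _ ⟨w, hw, h⟩ (Or.inr rfl)
    have h1 := noHit _ (List.mem_cons_self)
    have h2 := noHit _ (List.mem_cons_of_mem _ List.mem_cons_self)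
    simp [h1, h2]
  · -- B true: some scam wallet is a touched account, so one of A's scans hits
    rw [List.any_eq_true] at hB
    obtain ⟨w, hw, hc⟩ := hB
    rw [PySem.Set.contains_iff, mem_touched] at hc
    obtain ⟨tl, htl, t, htt, hat⟩ := hc
    simp only [List.mem_cons, List.not_mem_nil, or_false] at htl
    have hhit : pvHitA t scam = true := by
      rw [hitA_iff]
      rcases hat with h | h
      · exact Or.inl ⟨w, hw, h.symm⟩
      · exact Or.inr ⟨w, hw, h.symm⟩
    have hany : ∀ (tl' : List (List (String × String))), t ∈ tl' →
        tl'.any (fun t => pvHitA t scam) = true := by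
      intro tl' htm; rw [List.any_eq_true]; exact ⟨t, htm, hhit⟩
    rcases htl with rfl | rfl
    · simp [hany _ htt]
    · rcases hh : (((PySem.Dict.mk tx).get? "nativeTransfers").getD []).any
        (fun t => pvHitA t scam) <;> simp [hany _ htt]
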